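-- pv_equiv track=rewrite | github.com/belovetech/mastermind | DSA/alpha_mirror.py | alpha_mirror
-- ===== SOURCE A (Python) =====
-- def checkCase(res, start, end, ch):
--     rev = 25;
--     while (start <= end):
--         if (ord(ch) == start):
--             res.append(chr(ord(ch) + rev))
--         rev -= 2;
--         start += 1;
--
-- def alpha_mirror(str):
--     res = []
--     for ch in str:
--         if (ord(ch) >= 97 and ord(ch) <= 122):
--             checkCase(res, 97, 122, ch)
--         elif (ord(ch) >= 65 and ord(ch) <= 90):
--             checkCase(res, 65, 90, ch)
--         else:
--             res.append(ch)
--     return "".join(res)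
-- ===== SOURCE B (Python) =====
-- def alpha_mirror(str):
--     res = []
--     for ch in str:
--         o = ord(ch)
--         if 97 <= o <= 122:
--             res.append(chr(219 - o))
--         elif 65 <= o <= 90:
--             res.append(chr(155 - o))
--         else:
--             res.append(ch)
--     return "".join(res)
-- ===== Notes on version B (the rewrite author's own statement) =====
-- stated objective: faster
-- what changed: Replaced A's 26-iteration inner search loop (checkCase) per letter with a direct closed-form mirror formula chr(219-ord) / chr(155-ord), so there is no inner loop at all.
import Mathlib
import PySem

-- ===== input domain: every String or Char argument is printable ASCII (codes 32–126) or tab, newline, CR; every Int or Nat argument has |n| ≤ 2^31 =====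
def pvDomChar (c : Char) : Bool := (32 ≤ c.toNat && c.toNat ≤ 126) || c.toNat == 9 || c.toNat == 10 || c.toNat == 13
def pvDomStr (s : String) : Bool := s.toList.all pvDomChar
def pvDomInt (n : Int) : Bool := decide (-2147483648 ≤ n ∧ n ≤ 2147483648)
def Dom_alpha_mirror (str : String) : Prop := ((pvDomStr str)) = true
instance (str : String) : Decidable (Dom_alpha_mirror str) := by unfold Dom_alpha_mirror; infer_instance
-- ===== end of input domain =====

-- B replaces A's 26-step inner search loop per letter with the closed-form mirror formula (faster by a constant factor).

-- ===== PORT A =====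
-- A's while-loop helper; `rev` is the loop-carried variable (starts at 25 in Python, passed explicitly here).
def checkCase (res : List Char) (start stop : Int) (rev : Int) (ch : Char) : List Char :=
  if _h : start ≤ stop then
    let res' := if (ch.toNat : Int) = start then res ++ [Char.ofNat ((ch.toNat : Int) + rev).toNat] else res
    checkCase res' (start + 1) stop (rev - 2) ch
  else res
termination_by (stop + 1 - start).toNat
decreasing_by omega

def alpha_mirror (str : String) : String :=
  let res := str.toList.foldl (fun res ch =>
    if (ch.toNat : Int) ≥ 97 ∧ (ch.toNat : Int) ≤ 122 then checkCase res 97 122 25 ch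
    else if (ch.toNat : Int) ≥ 65 ∧ (ch.toNat : Int) ≤ 90 then checkCase res 65 90 25 ch
    else res ++ [ch]) []
  String.ofList res

-- ===== PORT B =====
def mirrorChar (ch : Char) : Char :=
  let o := ch.toNat
  if 97 ≤ o ∧ o ≤ 122 then Char.ofNat (219 - o)
  else if 65 ≤ o ∧ o ≤ 90 then Char.ofNat (155 - o)
  else ch

def alpha_mirror_alt (str : String) : String :=
  String.ofList (str.toList.map mirrorChar)

-- ===== PRECONDITION & SPEC =====
def Spec_alpha_mirror (str : String) (out : String) : Prop := out = alpha_mirror_alt str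
instance (str : String) (out : String) : Decidable (Spec_alpha_mirror str out) := by unfold Spec_alpha_mirror; infer_instance

-- ===== CLAIM (what is proved, stated in full; the proofs are below) =====
def Claim_equal_alpha_mirror : Prop := ∀ (str : String), Dom_alpha_mirror str → Spec_alpha_mirror str (alpha_mirror str)

-- ===== LEMMAS AND PROOFS =====

-- closed-form characterisation of A's inner loop
theorem checkCase_eq (res : List Char) (start stop rev : Int) (ch : Char) :
    checkCase res start stop rev ch =
      if start ≤ (ch.toNat : Int) ∧ (ch.toNat : Int) ≤ stop then
        res ++ [Char.ofNat ((ch.toNat : Int) + (rev - 2 * ((ch.toNat : Int) - start))).toNat]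
      else res := by
  induction res, start, rev using checkCase.induct (stop := stop) (ch := ch) with
  | case1 res start rev h res0 ih =>
    rw [checkCase]
    simp only [h, dif_pos]
    simp only [res0, dite_eq_ite] at ih
    rw [ih]
    split_ifs <;>
      first
        | rfl
        | (exfalso; omega)
        | (congr 3 <;> omega)
  | case2 res start rev h =>
    rw [checkCase]
    simp only [h, dif_neg, not_false_iff]
    rw [if_neg (by omega)]

theorem step_eq (res : List Char) (ch : Char) :
    (if (ch.toNat : Int) ≥ 97 ∧ (ch.toNat : Int) ≤ 122 then checkCase res 97 122 25 ch
     else if (ch.toNat : Int) ≥ 65 ∧ (ch.toNat : Int) ≤ 90 then checkCase res 65 90 25 ch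
     else res ++ [ch]) = res ++ [mirrorChar ch] := by
  unfold mirrorChar
  by_cases h1 : (ch.toNat : Int) ≥ 97 ∧ (ch.toNat : Int) ≤ 122
  · rw [if_pos h1, checkCase_eq, if_pos (by omega)]
    have : ((ch.toNat : Int) + (25 - 2 * ((ch.toNat : Int) - 97))).toNat = 219 - ch.toNat := by omega
    rw [this]
    simp only [if_pos (show 97 ≤ ch.toNat ∧ ch.toNat ≤ 122 by omega)]
  · rw [if_neg h1]
    by_cases h2 : (ch.toNat : Int) ≥ 65 ∧ (ch.toNat : Int) ≤ 90
    · rw [if_pos h2, checkCase_eq, if_pos (by omega)]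
      have : ((ch.toNat : Int) + (25 - 2 * ((ch.toNat : Int) - 65))).toNat = 155 - ch.toNat := by omega
      rw [this]
      rw [if_neg (show ¬ (97 ≤ ch.toNat ∧ ch.toNat ≤ 122) by omega),
          if_pos (show 65 ≤ ch.toNat ∧ ch.toNat ≤ 90 by omega)]
    · rw [if_neg h2,
          if_neg (show ¬ (97 ≤ ch.toNat ∧ ch.toNat ≤ 122) by omega),
          if_neg (show ¬ (65 ≤ ch.toNat ∧ ch.toNat ≤ 90) by omega)]

theorem foldl_eq_map (l : List Char) (res : List Char) :
    l.foldl (fun res ch =>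
      if (ch.toNat : Int) ≥ 97 ∧ (ch.toNat : Int) ≤ 122 then checkCase res 97 122 25 ch
      else if (ch.toNat : Int) ≥ 65 ∧ (ch.toNat : Int) ≤ 90 then checkCase res 65 90 25 ch
      else res ++ [ch]) res = res ++ l.map mirrorChar := by
  induction l generalizing res with
  | nil => simp
  | cons c t ih =>
    simp only [List.foldl_cons, List.map_cons]
    rw [step_eq, ih, List.append_assoc]
    rfl

-- ===== VERDICT (by name: the statement is the Claim_ definition above) =====
theorem alpha_mirror_spec : Claim_equal_alpha_mirror := by
  intro str _
  unfold Spec_alpha_mirror alpha_mirror alpha_mirror_alt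
  rw [foldl_eq_map]
  rfl
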